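-- pv_equiv track=rewrite | github.com/SuhasBRao/Python-Programs | Python files/Sorting Algorithms/Brute-force/insertion_sort.py | checkFurther
-- ===== SOURCE A (Python) =====
-- def checkFurther(i,key,arr):
--     # This checks if the key is smaller than the elements in sorted part of
--     # the list
--     if i >= 0:
--         if key < arr[i-1]:
--             return checkFurther(i-1,key,arr)
--         else:
--             arr.remove(key)
--             arr.insert(i,key)
--
--     if i<0:
--         arr.remove(key)
--         arr.insert(0,key)
--
--
--     return arr
-- ===== SOURCE B (Python) =====
-- def checkFurther(i, key, arr):
--     # Mutates arr in place, like A: remove key by value, reinsert in the sorted prefix.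
--     while i >= 0 and key < arr[i-1]:
--         i -= 1
--     arr.remove(key)
--     arr.insert(max(i, 0), key)
--     return arr
-- ===== Notes on version B (the rewrite author's own statement) =====
-- stated objective: idiomatic
-- what changed: Replaces the tail recursion with an explicit backward while-loop that first finds the insertion point, then performs a single remove+insert with the two branches merged into max(i,0).
import Mathlib
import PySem

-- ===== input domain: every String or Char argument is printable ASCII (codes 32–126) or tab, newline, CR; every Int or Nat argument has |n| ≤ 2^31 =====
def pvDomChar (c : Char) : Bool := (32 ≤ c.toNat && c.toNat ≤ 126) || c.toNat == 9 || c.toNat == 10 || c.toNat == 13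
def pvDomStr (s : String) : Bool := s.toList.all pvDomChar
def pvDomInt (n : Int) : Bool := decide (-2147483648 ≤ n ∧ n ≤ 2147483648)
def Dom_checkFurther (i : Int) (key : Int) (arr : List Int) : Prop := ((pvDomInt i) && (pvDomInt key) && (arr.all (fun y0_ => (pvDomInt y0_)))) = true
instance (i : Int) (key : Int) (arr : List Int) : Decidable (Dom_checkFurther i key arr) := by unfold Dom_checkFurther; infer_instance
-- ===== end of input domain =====

-- B replaces A's tail recursion by an explicit backward scan finding the insertion point,
-- then one remove+insert at max(i,0) (idiomatic; same cost). Both A and B mutate arr in place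
-- identically; the equivalence proved is about the return value.


-- ===== PORT A =====
-- Literal transliteration of A's recursion. Where the Python would raise
-- (arr[i-1] IndexError, arr.remove ValueError) the port returns arr; those
-- inputs are excluded by Pre_checkFurther.
def checkFurther (i : Int) (key : Int) (arr : List Int) : List Int :=
  if _h : i ≥ 0 then
    match PySem.List.pyGet? arr (i - 1) with
    | none => arr  -- Python: IndexError (outside Pre_)
    | some v =>
      if key < v then checkFurther (i - 1) key arr
      else
        match PySem.List.remove? arr key with
        | none => arr  -- Python: ValueError (outside Pre_)
        | some a => PySem.List.insert a i key
  else
    match PySem.List.remove? arr key with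
    | none => arr  -- Python: ValueError (outside Pre_)
    | some a => PySem.List.insert a 0 key
termination_by (i + 1).toNat
decreasing_by omega

-- ===== PORT B =====
-- B's while-loop: scan i backwards while key < arr[i-1].
def bScan (i : Int) (key : Int) (arr : List Int) : Int :=
  if _h : i ≥ 0 then
    match PySem.List.pyGet? arr (i - 1) with
    | none => i  -- Python: IndexError (outside Pre_)
    | some v => if key < v then bScan (i - 1) key arr else i
  else i
termination_by (i + 1).toNat
decreasing_by omega

def checkFurther_alt (i : Int) (key : Int) (arr : List Int) : List Int :=
  let j := bScan i key arr
  match PySem.List.remove? arr key with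
  | none => arr  -- Python: ValueError (outside Pre_)
  | some a => PySem.List.insert a (max j 0) key

-- ===== PRECONDITION & SPEC =====
-- Pre_ excludes exactly the inputs where the Python A raises: key missing from
-- arr (ValueError from arr.remove) and i > len(arr) (IndexError from arr[i-1]).
def Pre_checkFurther (i : Int) (key : Int) (arr : List Int) : Prop :=
  key ∈ arr ∧ i ≤ (arr.length : Int)
instance (i : Int) (key : Int) (arr : List Int) : Decidable (Pre_checkFurther i key arr) := by
  unfold Pre_checkFurther; infer_instance

def pvWitness_checkFurther : Int × Int × List Int := (2, 1, [3, 4, 1])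

def Spec_checkFurther (i : Int) (key : Int) (arr : List Int) (out : List Int) : Prop := out = checkFurther_alt i key arr
instance (i : Int) (key : Int) (arr : List Int) (out : List Int) : Decidable (Spec_checkFurther i key arr out) := by unfold Spec_checkFurther; infer_instance

-- ===== CLAIM (what is proved, stated in full; the proofs are below) =====
def Claim_equal_checkFurther : Prop := ∀ (i : Int) (key : Int) (arr : List Int), Dom_checkFurther i key arr → Pre_checkFurther i key arr → Spec_checkFurther i key arr (checkFurther i key arr)

-- ===== LEMMAS AND PROOFS =====

-- Under the precondition, arr[i-1] exists whenever 0 ≤ i ≤ len(arr) and arr ≠ [].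
theorem pyGet_isSome_of_pre (arr : List Int) (i : Int)
    (hne : arr ≠ []) (h0 : 0 ≤ i) (hle : i ≤ (arr.length : Int)) :
    ∃ v, PySem.List.pyGet? arr (i - 1) = some v := by
  have hlen : 0 < arr.length := List.length_pos_iff.mpr hne
  have : ¬ PySem.List.pyGet? arr (i - 1) = none := by
    rw [PySem.List.pyGet?_eq_none_iff]
    unfold PySem.Raise.InRange
    omega
  cases hg : PySem.List.pyGet? arr (i - 1) with
  | none => exact absurd hg this
  | some v => exact ⟨v, rfl⟩

theorem main_lemma : ∀ (n : Nat) (i key : Int) (arr : List Int),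
    (i + 1).toNat ≤ n → key ∈ arr → i ≤ (arr.length : Int) →
    checkFurther i key arr = checkFurther_alt i key arr := by
  intro n
  induction n with
  | zero =>
    intro i key arr hn hmem hle
    have hi : i < 0 := by omega
    rw [checkFurther, checkFurther_alt, bScan]
    simp only [show ¬ i ≥ 0 by omega, dif_neg, not_false_iff]
    simp [show max i 0 = 0 by omega]
  | succ m ih =>
    intro i key arr hn hmem hle
    rw [checkFurther, checkFurther_alt, bScan]
    by_cases hi : i ≥ 0
    · obtain ⟨v, hv⟩ := pyGet_isSome_of_pre arr i (by rintro rfl; simp at hmem) hi hle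
      simp only [dif_pos hi, hv]
      by_cases hk : key < v
      · simp only [if_pos hk]
        rw [ih (i - 1) key arr (by omega) hmem (by omega)]
        rfl
      · simp [if_neg hk, show max i 0 = i by omega]
    · simp [dif_neg hi, show max i 0 = 0 by omega]

-- ===== VERDICT (by name: the statement is the Claim_ definition above) =====
theorem checkFurther_spec : Claim_equal_checkFurther := by
  intro i key arr _hdom hpre
  exact main_lemma (i + 1).toNat i key arr le_rfl hpre.1 hpre.2
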